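-- pv_equiv track=rewrite | github.com/parhambz/python | python project/project.py | sep
-- ===== SOURCE A (Python) =====
-- def sep(string):  # seperate with seprators
--     string = string + " "
--     seps = [" ", "(", ")", ":", ";", "=", ",", "&", "|", "~", "\n"]
--     res = []
--     temp = ""
--     for x in string:
--         if x in seps:
--             if x != " " and x != "\n":
--                 res = res + [temp] + [x]
--                 temp = ""
--             else:
--                 res = res + [temp]
--                 temp = ""
--         else:
--             temp = temp + x
--
--     return [x for x in res if x != ""]
-- ===== SOURCE B (Python) =====
-- def sep(string):  # seperate with seprators
--     SEPS = "():;=,&|~"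
--     SKIP = " \n"
--     tokens = []
--     i = 0
--     n = len(string)
--     while i < n:
--         c = string[i]
--         if c in SEPS:
--             tokens.append(c)
--             i += 1
--         elif c in SKIP:
--             i += 1
--         else:
--             j = i + 1
--             while j < n and string[j] not in SEPS and string[j] not in SKIP:
--                 j += 1
--             tokens.append(string[i:j])
--             i = j
--     return tokens
-- ===== Notes on version B (the rewrite author's own statement) =====
-- stated objective: faster
-- what changed: Replaced A's quadratic accumulator loop (rebuilding res with list concatenation and filtering empties at the end) with a single-pass index tokenizer that emits each separator token and each maximal ordinary-character run directly by slicing, never producing empty tokens.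
import Mathlib
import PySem

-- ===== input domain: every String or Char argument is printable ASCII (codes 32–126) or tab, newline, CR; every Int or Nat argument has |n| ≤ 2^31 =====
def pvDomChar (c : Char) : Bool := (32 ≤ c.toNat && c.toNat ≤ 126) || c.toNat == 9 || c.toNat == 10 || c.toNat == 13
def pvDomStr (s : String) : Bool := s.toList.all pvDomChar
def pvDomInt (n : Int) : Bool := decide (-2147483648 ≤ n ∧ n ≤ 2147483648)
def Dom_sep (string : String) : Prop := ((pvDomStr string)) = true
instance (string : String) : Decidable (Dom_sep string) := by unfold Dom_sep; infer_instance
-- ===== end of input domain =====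

-- B replaces A's accumulator/filter loop (which rebuilds res by concatenation) with a one-pass tokenizer emitting maximal runs directly.

-- ===== PORT A =====
-- seps = [" ", "(", ")", ":", ";", "=", ",", "&", "|", "~", "\n"]
def sepSeps : List Char := [' ', '(', ')', ':', ';', '=', ',', '&', '|', '~', '\n']

-- the loop body, on state (res, temp); temp is a List Char (Python string concat temp + x)
def sepStep (st : List String × List Char) (x : Char) : List String × List Char :=
  if x ∈ sepSeps then
    if x ≠ ' ' ∧ x ≠ '\n' then
      (st.1 ++ [String.ofList st.2] ++ [String.ofList [x]], [])
    else
      (st.1 ++ [String.ofList st.2], [])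
  else
    (st.1, st.2 ++ [x])

def sep (string : String) : List String :=
  let s := string.toList ++ [' ']          -- string = string + " "
  let st := s.foldl sepStep ([], [])
  st.1.filter (fun x => x ≠ "")            -- [x for x in res if x != ""]

-- ===== PORT B =====
def sepIsTok (c : Char) : Bool := c ∈ ['(', ')', ':', ';', '=', ',', '&', '|', '~']
def sepIsSkip (c : Char) : Bool := c == ' ' || c == '\n'
def sepOrd (c : Char) : Bool := !(sepIsTok c || sepIsSkip c)

-- B's while loop: at each position emit a separator token, skip whitespace,
-- or emit the maximal run of ordinary characters (the slice string[i:j]).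
def sepAltGo : List Char → List String
  | [] => []
  | c :: cs =>
    if sepIsTok c then String.ofList [c] :: sepAltGo cs
    else if sepIsSkip c then sepAltGo cs
    else String.ofList (c :: cs.takeWhile sepOrd) :: sepAltGo (cs.dropWhile sepOrd)
termination_by l => l.length
decreasing_by
  · simp
  · simp
  · simpa using Nat.lt_succ_of_le (List.length_dropWhile_le sepOrd cs)

def sep_alt (string : String) : List String := sepAltGo string.toList

-- ===== PRECONDITION & SPEC =====
def Spec_sep (string : String) (out : List String) : Prop := out = sep_alt string
instance (string : String) (out : List String) : Decidable (Spec_sep string out) := by unfold Spec_sep; infer_instance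

-- ===== CLAIM (what is proved, stated in full; the proofs are below) =====
def Claim_equal_sep : Prop := ∀ (string : String), Dom_sep string → Spec_sep string (sep string)

-- ===== LEMMAS AND PROOFS =====

-- one-step unfolding of B's tokenizer
theorem sepAltGo_cons (c : Char) (cs : List Char) :
    sepAltGo (c :: cs) =
      if sepIsTok c then String.ofList [c] :: sepAltGo cs
      else if sepIsSkip c then sepAltGo cs
      else String.ofList (c :: cs.takeWhile sepOrd) :: sepAltGo (cs.dropWhile sepOrd) := by
  rw [sepAltGo.eq_def]

-- splitting an all-ordinary prefix off takeWhile/dropWhile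
theorem takeWhile_all (l : List Char) (x : List Char) (h : ∀ c ∈ l, sepOrd c = true)
    (hx : x.takeWhile sepOrd = []) :
    (l ++ x).takeWhile sepOrd = l ∧ (l ++ x).dropWhile sepOrd = x := by
  induction l with
  | nil =>
    refine ⟨by simpa using hx, ?_⟩
    cases x with
    | nil => simp
    | cons y ys =>
      simp only [List.takeWhile] at hx
      cases hy : sepOrd y with
      | true => rw [hy] at hx; simp at hx
      | false => simp [hy]
  | cons c cs ih =>
    have hc : sepOrd c = true := h c (by simp)
    have := ih (fun d hd => h d (by simp [hd]))
    simp [hc, this]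

-- characterisations of A's branch conditions in terms of B's character classes
theorem tok_cases (x : Char) (htok : sepIsTok x = true) :
    x ∈ sepSeps ∧ x ≠ ' ' ∧ x ≠ '\n' := by
  simp [sepIsTok] at htok
  rcases htok with h|h|h|h|h|h|h|h|h <;> simp [h, sepSeps]

theorem ord_not_sep (x : Char) (hord : sepOrd x = true) : x ∉ sepSeps := by
  intro hm
  simp [sepSeps] at hm
  rcases hm with h|h|h|h|h|h|h|h|h|h|h <;>
    simp [h, sepIsTok, sepIsSkip, sepOrd] at hord

-- the main loop invariant: A's fold from (res, temp), over the rest plus the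
-- trailing space, filtered, equals res filtered plus B's tokens of temp ++ rest.
theorem sep_key (cs : List Char) (res : List String) (temp : List Char)
    (h : ∀ c ∈ temp, sepOrd c = true) :
    ((cs ++ [' ']).foldl sepStep (res, temp)).1.filter (fun x => x ≠ "") =
      res.filter (fun x => x ≠ "") ++ sepAltGo (temp ++ cs) := by
  induction cs generalizing res temp with
  | nil =>
    simp only [List.nil_append, List.foldl_cons, List.foldl_nil]
    have hstep : sepStep (res, temp) ' ' = (res ++ [String.ofList temp], []) := by
      simp [sepStep, sepSeps]
    rw [hstep]
    cases temp with
    | nil => simp [sepAltGo]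
    | cons c rest =>
      have hc : sepIsTok c = false ∧ sepIsSkip c = false := by
        have := h c (by simp); simp [sepOrd] at this; tauto
      rw [List.append_nil, sepAltGo_cons]
      have htw := takeWhile_all rest [] (fun d hd => h d (by simp [hd])) (by simp)
      simp only [List.append_nil] at htw
      simp [hc.1, hc.2, htw.1, htw.2, sepAltGo, List.filter_append]
  | cons x cs' ih =>
    simp only [List.cons_append, List.foldl_cons]
    by_cases htok : sepIsTok x = true
    · obtain ⟨hmem, hne⟩ := tok_cases x htok
      have hstep : sepStep (res, temp) x =
          (res ++ [String.ofList temp] ++ [String.ofList [x]], []) := by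
        simp [sepStep, hmem, hne.1, hne.2]
      rw [hstep, ih _ _ (by intro c hc; simp at hc)]
      cases temp with
      | nil =>
        simp only [List.nil_append]; rw [sepAltGo_cons]
        simp [htok, List.filter_append]
      | cons c rest =>
        have hc : sepIsTok c = false ∧ sepIsSkip c = false := by
          have := h c (by simp); simp [sepOrd] at this; tauto
        have hxo : sepOrd x = false := by simp [sepOrd, htok]
        rw [List.cons_append, sepAltGo_cons]
        have htw := takeWhile_all rest (x :: cs') (fun d hd => h d (by simp [hd]))
          (by simp [List.takeWhile, hxo])
        rw [htw.1, htw.2, sepAltGo_cons]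
        simp [hc.1, hc.2, htok, List.filter_append]
    · by_cases hskip : sepIsSkip x = true
      · have hx : x = ' ' ∨ x = '\n' := by
          simp [sepIsSkip] at hskip; tauto
        have hstep : sepStep (res, temp) x = (res ++ [String.ofList temp], []) := by
          rcases hx with hx | hx <;> simp [sepStep, hx, sepSeps]
        rw [hstep, ih _ _ (by intro c hc; simp at hc)]
        cases temp with
        | nil =>
          simp only [List.nil_append]; rw [sepAltGo_cons]
          simp [htok, hskip, List.filter_append]
        | cons c rest =>
          have hc : sepIsTok c = false ∧ sepIsSkip c = false := by
            have := h c (by simp); simp [sepOrd] at this; tauto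
          have hxo : sepOrd x = false := by simp [sepOrd, hskip]
          rw [List.cons_append, sepAltGo_cons]
          have htw := takeWhile_all rest (x :: cs') (fun d hd => h d (by simp [hd]))
            (by simp [List.takeWhile, hxo])
          rw [htw.1, htw.2, sepAltGo_cons]
          simp [hc.1, hc.2, htok, hskip, List.filter_append]
      · have hord : sepOrd x = true := by simp [sepOrd, htok, hskip]
        have hstep : sepStep (res, temp) x = (res, temp ++ [x]) := by
          simp [sepStep, ord_not_sep x hord]
        rw [hstep, ih res (temp ++ [x])
          (by intro c hc; rcases List.mem_append.mp hc with hc | hc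
              · exact h c hc
              · simp at hc; simpa [hc] using hord)]
        rw [List.append_assoc]
        simp

-- ===== VERDICT (by name: the statement is the Claim_ definition above) =====
theorem sep_spec : Claim_equal_sep := by
  intro s _
  show _ = _
  unfold sep sep_alt
  simpa using sep_key s.toList [] [] (by intro c hc; simp at hc)
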